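-- pv_equiv track=rewrite | github.com/dkotenko/Lem-in | vi/vi.py | input_to_dict2
-- ===== SOURCE A (Python) =====
-- def input_to_dict2(lst):
-- 	d = {}
-- 	for elem in lst:
-- 		ant_name, room_name = elem.split("-")
-- 		if not ant_name in d:
-- 			d[ant_name] = []
-- 		d[ant_name].append(room_name)
-- 	return d
-- ===== SOURCE B (Python) =====
-- def input_to_dict2(lst):
-- 	pairs = []
-- 	for elem in lst:
-- 		ant_name, room_name = elem.split("-")
-- 		pairs.append((ant_name, room_name))
-- 	order = dict.fromkeys(ant for ant, _ in pairs)
-- 	return {ant: [room for a, room in pairs if a == ant] for ant in order}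
-- ===== Notes on version B (the rewrite author's own statement) =====
-- stated objective: alternative
-- what changed: Replaces the single-pass dict-accumulation (create-empty-then-append per element) with a three-stage pipeline: first split all elements into (ant, room) pairs, then extract the key order with dict.fromkeys, then build each ant's room list by a filtered comprehension over the pairs.
import Mathlib
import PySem

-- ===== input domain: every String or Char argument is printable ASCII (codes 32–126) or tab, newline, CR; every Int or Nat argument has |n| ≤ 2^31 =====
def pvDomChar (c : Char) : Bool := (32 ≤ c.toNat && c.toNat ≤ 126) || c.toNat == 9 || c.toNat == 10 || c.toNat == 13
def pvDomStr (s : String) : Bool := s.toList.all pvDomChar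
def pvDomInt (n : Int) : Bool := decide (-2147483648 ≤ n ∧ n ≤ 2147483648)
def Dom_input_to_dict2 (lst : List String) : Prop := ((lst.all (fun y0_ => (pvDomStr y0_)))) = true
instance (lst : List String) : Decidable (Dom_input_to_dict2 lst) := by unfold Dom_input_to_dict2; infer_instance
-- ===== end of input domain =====

-- B replaces A's single-pass dict accumulation by a split-all / key-order / per-key filter pipeline (objective: alternative).

-- ===== PORT A =====
-- 'd[ant_name].append(room_name)' after the presence guard is ported as Dict.modify (the key is present there, so the default [] is never used).
def input_to_dict2 (lst : List String) : List (String × List String) :=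
  (lst.foldl (fun d elem =>
    match PySem.Str.split? elem "-" with
    | some [ant_name, room_name] =>
        let d := if d.contains ant_name = false then d.insert ant_name ([] : List String) else d
        d.modify ant_name [] (fun v => v ++ [room_name])
    | _ => d) (PySem.Dict.empty : PySem.Dict String (List String))).items

-- ===== PORT B =====
def input_to_dict2_alt (lst : List String) : List (String × List String) :=
  let pairs : List (String × String) := lst.foldl (fun acc elem =>
    match PySem.Str.split? elem "-" with
    | some parts =>
        match parts with
        | [] => acc
        | ant_name :: rest =>
            match rest with
            | [] => acc
            | room_name :: rest2 =>
                match rest2 with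
                | [] => acc ++ [(ant_name, room_name)]
                | _ :: _ => acc
    | none => acc) []
  let order := PySem.List.dedup (pairs.map (fun p => p.1))
  order.map (fun ant => (ant, (pairs.filter (fun p => p.1 == ant)).map (fun p => p.2)))

-- ===== PRECONDITION & SPEC =====
-- Pre_ excludes elements that do not contain exactly one '-' : on those A's tuple unpacking raises ValueError (no value returned).
def Pre_input_to_dict2 (lst : List String) : Prop :=
  ∀ s ∈ lst, (PySem.Str.split? s "-").map List.length = some 2
instance (lst : List String) : Decidable (Pre_input_to_dict2 lst) := by unfold Pre_input_to_dict2; infer_instance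
def pvWitness_input_to_dict2 : List String := ["A-ra", "B-rb", "A-rc"]
def Spec_input_to_dict2 (lst : List String) (out : List (String × List String)) : Prop := out = input_to_dict2_alt lst
instance (lst : List String) (out : List (String × List String)) : Decidable (Spec_input_to_dict2 lst out) := by unfold Spec_input_to_dict2; infer_instance

-- ===== CLAIM (what is proved, stated in full; the proofs are below) =====
def Claim_equal_input_to_dict2 : Prop := ∀ (lst : List String), Dom_input_to_dict2 lst → Pre_input_to_dict2 lst → Spec_input_to_dict2 lst (input_to_dict2 lst)

-- ===== LEMMAS AND PROOFS =====

-- the (ant, room) pair of a well-formed element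
def pvToPair (s : String) : String × String :=
  match PySem.Str.split? s "-" with
  | some [a, r] => (a, r)
  | _ => ("", "")

-- inserting an empty list at an absent key and then appending to it is one modify
theorem pv_insert_modify (d : PySem.Dict String (List String)) (a r : String)
    (h : d.contains a = false) :
    (d.insert a ([] : List String)).modify a [] (· ++ [r]) = d.modify a [] (· ++ [r]) := by
  cases d with | mk items =>
  simp only [PySem.Dict.contains] at h
  have h' : ∀ x ∈ items, x.1 ≠ a := by
    intro x hx
    have := List.any_eq_false.mp h x hx
    simpa using this
  have hfind : items.find? (fun p => p.1 == a) = none := by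
    rw [List.find?_eq_none]; intro x hx; simpa using h' x hx
  have hmapid : items.map (fun p => if (p.1 == a) = true then (a, ([] : List String)) else p) = items := by
    conv_rhs => rw [← List.map_id items]
    exact List.map_congr_left (fun x hx => by simp [h' x hx])
  have hmapid2 : ∀ w : List String, items.map (fun p => if p.1 = a then (a, w) else p) = items := by
    intro w
    conv_rhs => rw [← List.map_id items]
    exact List.map_congr_left (fun x hx => by simp [h' x hx])
  simp only [PySem.Dict.insert, PySem.Dict.modify, PySem.Dict.contains, PySem.Dict.get?, PySem.Dict.getD, h,
    Bool.false_eq_true, if_false, List.any_append, List.find?_append, hfind, hmapid,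
    List.map_append, Bool.false_or]
  simp [hmapid2]

-- A's loop body on a well-formed element is one modify at the element's ant key
theorem pv_stepA_eq (d : PySem.Dict String (List String)) (e : String)
    (h : (PySem.Str.split? e "-").map List.length = some 2) :
    (match PySem.Str.split? e "-" with
      | some [ant_name, room_name] =>
          let d' := if d.contains ant_name = false then d.insert ant_name ([] : List String) else d
          d'.modify ant_name [] (fun v => v ++ [room_name])
      | _ => d)
    = d.modify (pvToPair e).1 [] (fun v => v ++ [(pvToPair e).2]) := by
  cases hs : PySem.Str.split? e "-" with
  | none => simp [hs] at h
  | some l =>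
    simp only [hs, Option.map_some, Option.some.injEq] at h
    match l, h with
    | [a, r], _ =>
      simp only [pvToPair, hs]
      by_cases hc : d.contains a = false
      · rw [if_pos hc]
        exact pv_insert_modify d a r hc
      · have hc' : d.contains a = true := by simpa using hc
        simp [hc']

-- B's pair-collecting loop body on a well-formed element appends the element's pair
theorem pv_stepB_eq (acc : List (String × String)) (e : String)
    (h : (PySem.Str.split? e "-").map List.length = some 2) :
    (match PySem.Str.split? e "-" with
      | some parts =>
          match parts with
          | [] => acc
          | ant_name :: rest =>
              match rest with
              | [] => acc
              | room_name :: rest2 =>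
                  match rest2 with
                  | [] => acc ++ [(ant_name, room_name)]
                  | _ :: _ => acc
      | none => acc)
    = acc ++ [pvToPair e] := by
  cases hs : PySem.Str.split? e "-" with
  | none => simp [hs] at h
  | some l =>
    simp only [hs, Option.map_some, Option.some.injEq] at h
    match l, h with
    | [a, r], _ => simp [pvToPair, hs]

-- the items of the modify-fold dict are exactly B's grouping of the pair list
theorem pv_fold_items (ps : List (String × String)) :
    (ps.foldl (fun d p => d.modify p.1 [] (fun v => v ++ [p.2])) (PySem.Dict.empty : PySem.Dict String (List String))).items
      = (PySem.List.dedup (ps.map (fun p => p.1))).map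
          (fun ant => (ant, (ps.filter (fun p => p.1 == ant)).map (fun p => p.2))) := by
  have hnd : (ps.foldl (fun d p => d.modify p.1 [] (fun v => v ++ [p.2])) (PySem.Dict.empty : PySem.Dict String (List String))).keys.Nodup :=
    PySem.Dict.nodup_keys_foldl_modify_key ps (fun p => p.1) [] (fun _ p => fun v => v ++ [p.2]) _ PySem.Dict.nodup_keys_empty
  rw [PySem.Dict.items_eq_map_keys _ hnd ([] : List String),
      PySem.Dict.keys_foldl_modify_key ps (fun p => p.1) [] (fun _ p => fun v => v ++ [p.2])]
  rw [PySem.Dict.keys_empty, PySem.List.dedup_eq_ofList]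
  exact List.map_congr_left (fun k _ => by
    rw [PySem.Dict.getD_foldl_modify_append ps _ k, PySem.Dict.getD_empty]
    simp)

-- ===== VERDICT (by name: the statement is the Claim_ definition above) =====
theorem input_to_dict2_spec : Claim_equal_input_to_dict2 := by
  intro lst _ hpre
  unfold Spec_input_to_dict2 input_to_dict2 input_to_dict2_alt
  rw [PySem.List.foldl_congr_mem _ _
        (fun d e => d.modify (pvToPair e).1 [] (fun v => v ++ [(pvToPair e).2])) _
        (fun d e he => pv_stepA_eq d e (hpre e he)),
      PySem.List.foldl_congr_mem _ _ (fun acc e => acc ++ [pvToPair e]) _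
        (fun acc e he => pv_stepB_eq acc e (hpre e he)),
      PySem.List.foldl_append_singleton_eq_map, List.nil_append]
  rw [show (lst.foldl (fun d e => d.modify (pvToPair e).1 [] (fun v => v ++ [(pvToPair e).2]))
        (PySem.Dict.empty : PySem.Dict String (List String)))
      = ((lst.map pvToPair).foldl (fun d p => d.modify p.1 [] (fun v => v ++ [p.2]))
        (PySem.Dict.empty : PySem.Dict String (List String))) from by rw [List.foldl_map]]
  exact pv_fold_items (lst.map pvToPair)
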